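-- pv_equiv track=rewrite | github.com/dariomx/topcoder-srm | leetcode/second-pass/google/regular-expression-matching/Solution3.py | normalizePat
-- ===== SOURCE A (Python) =====
-- def normalizePat(pat):
--     normPat = ""
--     cnt = 0
--     for c in pat:
--         if c == '*':
--             cnt += 1
--             if cnt == 1:
--                 normPat = normPat + c
--         else:
--             normPat = normPat + c
--             cnt = 0
--     return normPat
-- ===== SOURCE B (Python) =====
-- def normalizePat(pat):
--     # Run-grouping: walk the string as maximal runs of equal characters,
--     # collect one part per run ('*' for a star run, the run itself otherwise),
--     # and join the parts at the end.
--     parts = []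
--     i, n = 0, len(pat)
--     while i < n:
--         head = pat[i]
--         j = i + 1
--         while j < n and pat[j] == head:
--             j += 1
--         parts.append("*" if head == "*" else pat[i:j])
--         i = j
--     return "".join(parts)
-- ===== Notes on version B (the rewrite author's own statement) =====
-- stated objective: alternative
-- what changed: A's per-character scan with a running star counter and repeated string concatenation is replaced by run-grouping: split the string into maximal runs of equal characters, map each run to one part (a single '*' for star runs, the run unchanged otherwise) and join the parts.
import Mathlib
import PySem

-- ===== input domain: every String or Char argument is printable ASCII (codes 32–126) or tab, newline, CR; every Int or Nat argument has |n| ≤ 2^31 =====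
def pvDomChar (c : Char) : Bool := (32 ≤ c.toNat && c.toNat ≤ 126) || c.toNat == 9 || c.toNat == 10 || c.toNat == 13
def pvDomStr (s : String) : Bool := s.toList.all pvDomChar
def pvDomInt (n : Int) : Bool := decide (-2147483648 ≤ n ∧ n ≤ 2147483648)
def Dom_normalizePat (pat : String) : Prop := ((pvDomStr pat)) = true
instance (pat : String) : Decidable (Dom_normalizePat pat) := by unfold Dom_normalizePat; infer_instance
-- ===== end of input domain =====

-- B replaces A's per-character scan with a running star counter by a recursive
-- run-grouping (peel the maximal leading run, collapse star runs, recurse);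
-- objective: alternative.

-- ===== PORT A =====
-- the for-loop of A, state = (normPat, cnt)
def normalizePatLoop : List Char → String → Int → String
  | [], acc, _ => acc
  | c :: rest, acc, cnt =>
    if c == '*' then
      let cnt' := cnt + 1
      normalizePatLoop rest (if cnt' == 1 then acc.push c else acc) cnt'
    else
      normalizePatLoop rest (acc.push c) 0

def normalizePat (pat : String) : String :=
  normalizePatLoop pat.toList "" 0

-- ===== PORT B =====
-- the outer 'while i < n' loop becomes recursion on the remaining suffix with
-- the parts accumulator; the inner 'while j < n and pat[j] == head' run scan is
-- the maximal equal prefix of the tail (takeWhile); 'pat[i:j]' is head :: run;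
-- ''.join(parts) is flatten.
def normalizePatAltGo : List Char → List (List Char) → List (List Char)
  | [], parts => parts
  | c :: rest, parts =>
    let run := rest.takeWhile (· == c)
    let part := if c = '*' then ['*'] else c :: run
    normalizePatAltGo (rest.drop run.length) (parts ++ [part])
termination_by l _ => l.length
decreasing_by
  simp only [List.length_drop, List.length_cons]
  omega

def normalizePat_alt (pat : String) : String :=
  String.ofList (normalizePatAltGo pat.toList []).flatten

-- ===== PRECONDITION & SPEC =====
def Spec_normalizePat (pat : String) (out : String) : Prop := out = normalizePat_alt pat
instance (pat : String) (out : String) : Decidable (Spec_normalizePat pat out) := by unfold Spec_normalizePat; infer_instance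

-- ===== CLAIM (what is proved, stated in full; the proofs are below) =====
def Claim_equal_normalizePat : Prop := ∀ (pat : String), Dom_normalizePat pat → Spec_normalizePat pat (normalizePat pat)

-- ===== LEMMAS AND PROOFS =====

-- Common characterisation: keep a char unless it is a '*' and the flag
-- (= "previous char was '*'") holds.
def pvSpec : List Char → Bool → List Char
  | [], _ => []
  | c :: rest, p =>
    if c = '*' then (if p then pvSpec rest true else '*' :: pvSpec rest true)
    else c :: pvSpec rest false

theorem aLoop_toList : ∀ (l : List Char) (acc : String) (cnt : Int), 0 ≤ cnt →
    (normalizePatLoop l acc cnt).toList = acc.toList ++ pvSpec l (cnt != 0) := by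
  intro l
  induction l with
  | nil => intro acc cnt h; simp [normalizePatLoop, pvSpec]
  | cons c rest ih =>
    intro acc cnt h
    by_cases hc : c = '*'
    · subst hc
      by_cases hz : cnt = 0
      · subst hz
        simp [normalizePatLoop, pvSpec, ih _ 1 (by omega)]
      · have h1 : (cnt + 1 == (1:Int)) = false := by
          simp; omega
        have h2 : (cnt != (0:Int)) = true := by simpa using hz
        simp only [normalizePatLoop, pvSpec, h1, h2, if_true, beq_self_eq_true]
        rw [ih _ (cnt + 1) (by omega)]
        have : (cnt + 1 != (0:Int)) = true := by simp; omega
        simp [this]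
    · have hc' : (c == '*') = false := by simpa using hc
      simp only [normalizePatLoop, pvSpec, hc', if_neg hc, Bool.false_eq_true,
        if_false]
      rw [ih _ 0 (by omega)]
      simp

theorem a_eq_spec (pat : String) :
    (normalizePat pat).toList = pvSpec pat.toList false := by
  simpa using aLoop_toList pat.toList "" 0 (by omega)

-- a run of copies of a non-star char passes through pvSpec unchanged
theorem pvSpec_run_nonstar (c : Char) (hc : c ≠ '*') :
    ∀ (run rest : List Char), (∀ b ∈ run, b = c) →
      pvSpec (run ++ rest) false = run ++ pvSpec rest false := by
  intro run
  induction run with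
  | nil => intro rest _; simp
  | cons x xs ih =>
    intro rest hmem
    have hx : x = c := hmem x (by simp)
    subst hx
    simp only [List.cons_append, pvSpec, if_neg hc]
    rw [ih rest (fun b hb => hmem b (by simp [hb]))]

-- a run of stars is swallowed when the flag is set
theorem pvSpec_star_run :
    ∀ (run rest : List Char), (∀ b ∈ run, b = '*') →
      pvSpec (run ++ rest) true = pvSpec rest true := by
  intro run
  induction run with
  | nil => intro rest _; simp
  | cons x xs ih =>
    intro rest hmem
    have hx : x = '*' := hmem x (by simp)
    subst hx
    simp only [List.cons_append, pvSpec]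
    exact ih rest (fun b hb => hmem b (by simp [hb]))

-- the flag is irrelevant when the head is not a star
theorem pvSpec_flag (l : List Char) (h : ∀ x, l.head? = some x → x ≠ '*') :
    pvSpec l true = pvSpec l false := by
  cases l with
  | nil => rfl
  | cons x xs =>
    have hx : x ≠ '*' := h x rfl
    simp [pvSpec, if_neg hx]

theorem dropWhile_eq_drop_len (p : Char → Bool) (l : List Char) :
    l.dropWhile p = l.drop (l.takeWhile p).length := by
  induction l with
  | nil => rfl
  | cons x xs ih =>
    by_cases h : p x
    · simp [h, ih]
    · simp [h]

theorem head?_dropWhile_not' (p : Char → Bool) (l : List Char) (x : Char)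
    (h : (l.dropWhile p).head? = some x) : ¬ p x := by
  intro hp
  induction l with
  | nil => simp [List.dropWhile] at h
  | cons y ys ih =>
    by_cases hy : p y
    · rw [List.dropWhile_cons_of_pos hy] at h; exact ih h
    · rw [List.dropWhile_cons_of_neg hy] at h
      simp at h; subst h; exact hy hp

theorem altGo_eq_spec (l : List Char) (parts : List (List Char)) :
    (normalizePatAltGo l parts).flatten = parts.flatten ++ pvSpec l false := by
  induction l, parts using normalizePatAltGo.induct with
  | case1 parts => rw [normalizePatAltGo]; simp [pvSpec]
  | case2 c rest parts run part ih =>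
    rw [normalizePatAltGo]
    have hrun : ∀ b ∈ rest.takeWhile (· == c), b = c := by
      intro b hb
      simpa using List.mem_takeWhile_imp hb
    have hdrop : rest.drop (rest.takeWhile (· == c)).length
        = rest.dropWhile (· == c) := (dropWhile_eq_drop_len _ _).symm
    simp only [run, part, dite_eq_ite] at ih
    rw [ih]
    have hsplit : rest = rest.takeWhile (· == c) ++ rest.dropWhile (· == c) :=
      (List.takeWhile_append_dropWhile).symm
    by_cases hc : c = '*'
    · subst hc
      have h1 : pvSpec ('*' :: rest) false = '*' :: pvSpec rest true := by
        simp [pvSpec]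
      rw [h1]
      conv_rhs => rw [hsplit]
      rw [pvSpec_star_run _ _ hrun]
      rw [pvSpec_flag _ (fun x hx h' => by
        subst h'
        exact head?_dropWhile_not' _ rest _ hx (by simp))]
      simp [hdrop]
    · have h1 : pvSpec (c :: rest) false = c :: pvSpec rest false := by
        simp [pvSpec, if_neg hc]
      rw [h1]
      conv_rhs => rw [hsplit]
      rw [pvSpec_run_nonstar c hc _ _ hrun]
      simp [hdrop, if_neg hc]

theorem b_eq_spec (pat : String) :
    (normalizePat_alt pat).toList = pvSpec pat.toList false := by
  unfold normalizePat_alt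
  rw [String.toList_ofList, altGo_eq_spec]
  simp

-- ===== VERDICT (by name: the statement is the Claim_ definition above) =====
theorem normalizePat_spec : Claim_equal_normalizePat := by
  intro pat _
  unfold Spec_normalizePat
  rw [← String.toList_inj, a_eq_spec, b_eq_spec]
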